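-- pv_equiv track=rewrite | github.com/marcv81/cpu-stats | cpu_stats.py | is_cpu
-- ===== SOURCE A (Python) =====
-- def is_cpu(s):
--     """Tests if a string represents a CPU device."""
--     prefix = "cpu"
--     if not s.startswith(prefix):
--         return False
--     for c in s[len(prefix) :]:
--         if ord(c) < ord("0") or ord(c) > ord("9"):
--             return False
--     return True
-- ===== SOURCE B (Python) =====
-- def is_cpu(s):
--     """Tests if a string represents a CPU device."""
--     return s.rstrip("0123456789") == "cpu"
-- ===== Notes on version B (the rewrite author's own statement) =====
-- stated objective: idiomatic
-- what changed: Instead of A's left-to-right prefix test plus a per-character digit-range scan of the tail, B works from the right: it strips all trailing ASCII digits with s.rstrip("0123456789") and returns whether the remainder equals "cpu" exactly, so there is no prefix test and no digit loop.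
import Mathlib
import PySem

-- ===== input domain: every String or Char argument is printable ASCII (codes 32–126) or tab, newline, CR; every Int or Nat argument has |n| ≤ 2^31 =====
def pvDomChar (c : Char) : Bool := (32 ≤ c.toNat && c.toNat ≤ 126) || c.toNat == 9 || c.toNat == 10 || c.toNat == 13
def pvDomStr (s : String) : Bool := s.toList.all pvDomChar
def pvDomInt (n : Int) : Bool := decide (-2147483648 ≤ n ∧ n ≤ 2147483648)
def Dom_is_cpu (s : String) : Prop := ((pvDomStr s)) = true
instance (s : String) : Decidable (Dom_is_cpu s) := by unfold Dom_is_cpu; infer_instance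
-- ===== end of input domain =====

-- B replaces A's prefix test + left-to-right digit-range scan by the opposite
-- decomposition: strip all trailing ASCII digits from the RIGHT (s.rstrip("0123456789"))
-- and compare the remainder to "cpu" (idiomatic; same return value).

-- ===== PORT A =====
-- the for-loop over s[len(prefix):] with its early 'return False'
def isCpuScan : List Char → Bool
  | [] => true
  | c :: rest =>
      if c.toNat < ('0').toNat || c.toNat > ('9').toNat then false else isCpuScan rest

def is_cpu (s : String) : Bool :=
  let pfx := "cpu"           -- 'prefix' in the Python; renamed (Lean keyword)
  if !(PySem.Str.startswith s pfx) then false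
  else isCpuScan (PySem.Str.slice s (some (PySem.Str.len pfx)) none).toList

-- ===== PORT B =====
-- hand port of s.rstrip("0123456789") (PySem has no rstrip-with-chars): drop the
-- characters of the set from the right end of the code-point list; exact on all strings.
def pyDigits : List Char := ['0','1','2','3','4','5','6','7','8','9']

def rstripDigits (cs : List Char) : List Char :=
  (cs.reverse.dropWhile (fun c => pyDigits.contains c)).reverse

def is_cpu_alt (s : String) : Bool :=
  String.ofList (rstripDigits s.toList) == "cpu"

-- ===== PRECONDITION & SPEC =====
def Spec_is_cpu (s : String) (out : Bool) : Prop := out = is_cpu_alt s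
instance (s : String) (out : Bool) : Decidable (Spec_is_cpu s out) := by unfold Spec_is_cpu; infer_instance

-- ===== CLAIM (what is proved, stated in full; the proofs are below) =====
def Claim_equal_is_cpu : Prop := ∀ (s : String), Dom_is_cpu s → Spec_is_cpu s (is_cpu s)

-- ===== LEMMAS AND PROOFS =====

theorem char_toNat_inj (c c' : Char) (h : c.toNat = c'.toNat) : c = c' := by
  apply Char.ext
  exact UInt32.toNat_inj.mp h

theorem dig_iff (c : Char) :
    (pyDigits.contains c) = true ↔ 48 ≤ c.toNat ∧ c.toNat ≤ 57 := by
  constructor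
  · intro h
    simp only [pyDigits, List.contains_eq_mem, decide_eq_true_eq] at h
    fin_cases h <;> decide
  · rintro ⟨h1, h2⟩
    interval_cases h : c.toNat <;>
      [ (have he : c = '0' := char_toNat_inj _ _ (by rw [h]; rfl));
        (have he : c = '1' := char_toNat_inj _ _ (by rw [h]; rfl));
        (have he : c = '2' := char_toNat_inj _ _ (by rw [h]; rfl));
        (have he : c = '3' := char_toNat_inj _ _ (by rw [h]; rfl));
        (have he : c = '4' := char_toNat_inj _ _ (by rw [h]; rfl));
        (have he : c = '5' := char_toNat_inj _ _ (by rw [h]; rfl));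
        (have he : c = '6' := char_toNat_inj _ _ (by rw [h]; rfl));
        (have he : c = '7' := char_toNat_inj _ _ (by rw [h]; rfl));
        (have he : c = '8' := char_toNat_inj _ _ (by rw [h]; rfl));
        (have he : c = '9' := char_toNat_inj _ _ (by rw [h]; rfl))] <;>
      subst he <;> decide

theorem isCpuScan_eq_all (cs : List Char) :
    isCpuScan cs = cs.all (fun c => pyDigits.contains c) := by
  induction cs with
  | nil => rfl
  | cons c rest ih =>
      simp only [isCpuScan, List.all_cons]
      have h0 : ('0').toNat = 48 := by decide
      have h9 : ('9').toNat = 57 := by decide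
      by_cases h : c.toNat < 48 ∨ 57 < c.toNat
      · rw [if_pos (by simp [h0, h9]; omega)]
        have hc : (pyDigits.contains c) = false := by
          rw [Bool.eq_false_iff]
          intro hc
          have := (dig_iff c).mp hc
          omega
        rw [hc, Bool.false_and]
      · rw [if_neg (by simp [h0, h9]; omega)]
        have hc : (pyDigits.contains c) = true := by rw [dig_iff]; omega
        rw [hc, Bool.true_and]
        exact ih

-- a string built from a char list equals a literal iff the lists are equal
theorem beq_ofList (xs : List Char) (t : String) :
    (String.ofList xs == t) = (xs == t.toList) := by
  by_cases h : xs = t.toList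
  · subst h; simp
  · have h2 : String.ofList xs ≠ t := by
      intro hc
      exact h (by rw [← hc]; simp)
    simp [h, h2]

-- the right-strip result is "cpu" exactly when L = "cpu" ++ (all-digit tail)
theorem rstrip_eq_cpu_iff (L : List Char) :
    rstripDigits L = ['c','p','u'] ↔
      ∃ t, L = ['c','p','u'] ++ t ∧ t.all (fun c => pyDigits.contains c) = true := by
  constructor
  · intro h
    refine ⟨(L.reverse.takeWhile (fun c => pyDigits.contains c)).reverse, ?_, ?_⟩
    · have hsplit := congrArg List.reverse
        (List.takeWhile_append_dropWhile
          (p := fun c => pyDigits.contains c) (l := L.reverse))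
      simp only [List.reverse_append, List.reverse_reverse] at hsplit
      unfold rstripDigits at h
      conv_lhs => rw [← hsplit]
      rw [h]
    · rw [List.all_eq_true]
      intro x hx
      exact List.mem_takeWhile_imp (List.mem_reverse.mp hx)
  · rintro ⟨t, rfl, hall⟩
    unfold rstripDigits
    have h1 : (['c','p','u'] ++ t).reverse = t.reverse ++ ['u','p','c'] := by simp
    rw [h1, List.dropWhile_append]
    have h2 : t.reverse.dropWhile (fun c => pyDigits.contains c) = [] :=
      List.dropWhile_eq_nil_iff.mpr
        (fun x hx => (List.all_eq_true.mp hall) x (List.mem_reverse.mp hx))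
    rw [h2]
    decide

theorem is_cpu_eq (s : String) : is_cpu s = is_cpu_alt s := by
  have hlen : PySem.Str.len "cpu" = (3 : Int) := by decide
  have hslice_from : (PySem.Str.slice s (some 3) none).toList = s.toList.drop 3 := by
    simp [pysem]
  have hcpu : ("cpu" : String).toList = ['c', 'p', 'u'] := by decide
  simp only [is_cpu, is_cpu_alt, hlen, PySem.Str.startswith_eq, PySem.Chars.startswith,
    hslice_from, isCpuScan_eq_all, beq_ofList, hcpu]
  by_cases hp : (['c', 'p', 'u'] : List Char).isPrefixOf s.toList
  · have hpre : ['c', 'p', 'u'] <+: s.toList := by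
      simpa [List.isPrefixOf_iff_prefix] using hp
    obtain ⟨t, ht⟩ := hpre
    have hdrop3 : s.toList.drop 3 = t := by rw [← ht]; rfl
    simp only [hp, Bool.not_true, Bool.false_eq_true, if_false, hdrop3]
    by_cases hall : t.all (fun c => pyDigits.contains c) = true
    · have hB : rstripDigits s.toList = ['c','p','u'] :=
        (rstrip_eq_cpu_iff s.toList).mpr ⟨t, ht.symm, hall⟩
      rw [hB]
      simpa using hall
    · have hB : rstripDigits s.toList ≠ ['c','p','u'] := by
        intro hc
        obtain ⟨t', ht', hall'⟩ := (rstrip_eq_cpu_iff s.toList).mp hc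
        have het : t' = t := List.append_cancel_left (ht'.symm.trans ht.symm)
        exact hall (het ▸ hall')
      have hBf : (rstripDigits s.toList == ['c','p','u']) = false := by
        simpa using hB
      rw [hBf]
      simpa using hall
  · simp only [hp, Bool.not_false, if_true]
    have hB : rstripDigits s.toList ≠ ['c','p','u'] := by
      intro hc
      obtain ⟨t', ht', _⟩ := (rstrip_eq_cpu_iff s.toList).mp hc
      apply hp
      rw [List.isPrefixOf_iff_prefix, ht']
      exact List.prefix_append _ _
    simp [hB]

-- ===== VERDICT (by name: the statement is the Claim_ definition above) =====
theorem is_cpu_spec : Claim_equal_is_cpu := by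
  intro s _
  unfold Spec_is_cpu
  exact is_cpu_eq s
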